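-- pv_equiv track=rewrite | github.com/csci595-research-lit-spring-2024/595-class-project-spring-2024-Mokshithy | src/src/responses/1/q_0777_swapAdjacentInLrString.py | canTransform
-- ===== SOURCE A (Python) =====
-- def canTransform(start: str, end: str) -> bool:
--     if len(start) != len(end):
--         return False
--
--     if start.replace('X', '') != end.replace('X', ''):
--         return False
--
--     p1, p2 = 0, 0
--     while p1 < len(start) and p2 < len(end):
--         while p1 < len(start) and start[p1] == 'X':
--             p1 += 1
--         while p2 < len(end) and end[p2] == 'X':
--             p2 += 1
--
--         if p1 == len(start) or p2 == len(end):
--             break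
--
--         if start[p1] != end[p2] or (start[p1] == 'L' and p1 < p2) or (start[p1] == 'R' and p1 > p2):
--             return False
--
--         p1 += 1
--         p2 += 1
--
--     return True
-- ===== SOURCE B (Python) =====
-- def canTransform(start: str, end: str) -> bool:
--     if len(start) != len(end):
--         return False
--     if [c for c in start if c != 'X'] != [c for c in end if c != 'X']:
--         return False
--     # Prefix-count invariant: an 'L' only moves left and an 'R' only moves
--     # right, so every prefix of end must contain at least as many 'L's as the
--     # same prefix of start, and at most as many 'R's.
--     ls = rs = le = re = 0
--     for a, b in zip(start, end):
--         if a == 'L':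
--             ls += 1
--         elif a == 'R':
--             rs += 1
--         if b == 'L':
--             le += 1
--         elif b == 'R':
--             re += 1
--         if le < ls or re > rs:
--             return False
--     return True
-- ===== Notes on version B (the rewrite author's own statement) =====
-- stated objective: alternative
-- what changed: B replaces A's two-pointer position-matching of corresponding non-'X' characters by a prefix-count invariant: after checking the non-'X' sequences are equal, one synchronized zip pass keeps running counts of 'L' and 'R' in both strings and fails when any prefix of end has fewer 'L's or more 'R's than the same prefix of start; no positions are matched and no per-index string indexing is done.
import Mathlib
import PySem

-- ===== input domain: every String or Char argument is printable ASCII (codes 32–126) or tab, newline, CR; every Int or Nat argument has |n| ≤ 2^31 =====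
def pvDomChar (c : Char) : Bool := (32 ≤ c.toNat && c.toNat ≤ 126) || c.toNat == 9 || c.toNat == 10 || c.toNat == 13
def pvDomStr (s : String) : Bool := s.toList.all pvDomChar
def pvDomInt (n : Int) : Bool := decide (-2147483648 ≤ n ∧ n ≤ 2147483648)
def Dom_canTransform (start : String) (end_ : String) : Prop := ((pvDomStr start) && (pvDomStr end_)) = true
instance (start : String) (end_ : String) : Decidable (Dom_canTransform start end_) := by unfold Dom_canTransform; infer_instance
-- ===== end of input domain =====

-- B checks a prefix-count invariant (every prefix of end_ has at least as many 'L'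
-- and at most as many 'R' as the same prefix of start) instead of A's two-pointer
-- matching of positions of corresponding non-'X' characters; same O(n) cost.


-- ===== PORT A =====
-- inner `while start[p1] == 'X': p1 += 1` skip loop
def skipX (l : List Char) (p : Nat) : Nat :=
  if h : p < l.length then
    (if l[p] = 'X' then skipX l (p+1) else p)
  else p
termination_by l.length - p

-- facts the outer loop's termination argument cites
theorem skipX_ge (l : List Char) (p : Nat) : p ≤ skipX l p := by
  unfold skipX
  split
  · split
    · exact Nat.le_trans (Nat.le_succ p) (skipX_ge l (p+1))
    · exact Nat.le_refl p
  · exact Nat.le_refl p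
termination_by l.length - p

theorem skipX_le (l : List Char) (p : Nat) (h : p ≤ l.length) : skipX l p ≤ l.length := by
  unfold skipX
  split
  · split
    · exact skipX_le l (p+1) (by omega)
    · exact h
  · exact h
termination_by l.length - p

-- outer `while p1 < len(start) and p2 < len(end)` loop of A
def loopA (s e : List Char) (p1 p2 : Nat) : Bool :=
  if h : p1 < s.length ∧ p2 < e.length then
    if skipX s p1 = s.length ∨ skipX e p2 = e.length then true
    else
      if s.getD (skipX s p1) ' ' ≠ e.getD (skipX e p2) ' ' ∨
          (s.getD (skipX s p1) ' ' = 'L' ∧ skipX s p1 < skipX e p2) ∨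
          (s.getD (skipX s p1) ' ' = 'R' ∧ skipX s p1 > skipX e p2) then
        false
      else loopA s e (skipX s p1 + 1) (skipX e p2 + 1)
  else true
termination_by s.length - p1
decreasing_by
  have h1 := skipX_ge s p1
  have h2 := skipX_le s p1 (Nat.le_of_lt h.1)
  simp only [not_or] at *
  omega

def canTransform (start : String) (end_ : String) : Bool :=
  if PySem.Str.len start ≠ PySem.Str.len end_ then false
  else if PySem.Str.replace start "X" "" ≠ PySem.Str.replace end_ "X" "" then false
  else loopA start.toList end_.toList 0 0

-- ===== PORT B =====
-- B's `for a, b in zip(start, end)` prefix-count loop with if/elif counters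
def loopB : List (Char × Char) → Int → Int → Int → Int → Bool
  | [], _, _, _, _ => true
  | (a, b) :: t, ls, rs, le, re =>
    let ls' := if a = 'L' then ls + 1 else ls
    let rs' := if a = 'L' then rs else if a = 'R' then rs + 1 else rs
    let le' := if b = 'L' then le + 1 else le
    let re' := if b = 'L' then re else if b = 'R' then re + 1 else re
    if le' < ls' ∨ re' > rs' then false
    else loopB t ls' rs' le' re'

def canTransform_alt (start : String) (end_ : String) : Bool :=
  if PySem.Str.len start ≠ PySem.Str.len end_ then false
  else if start.toList.filter (fun c => c ≠ 'X') ≠ end_.toList.filter (fun c => c ≠ 'X') then false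
  else loopB (start.toList.zip end_.toList) 0 0 0 0

-- ===== PRECONDITION & SPEC =====
def Spec_canTransform (start : String) (end_ : String) (out : Bool) : Prop := out = canTransform_alt start end_
instance (start : String) (end_ : String) (out : Bool) : Decidable (Spec_canTransform start end_ out) := by unfold Spec_canTransform; infer_instance

-- ===== CLAIM (what is proved, stated in full; the proofs are below) =====
def Claim_equal_canTransform : Prop := ∀ (start : String) (end_ : String), Dom_canTransform start end_ → Spec_canTransform start end_ (canTransform start end_)

-- ===== LEMMAS AND PROOFS =====

-- the (char, index) table of the non-'X' characters of l starting at position p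
def F (l : List Char) (p : Nat) : List (Char × Int) :=
  if h : p < l.length then
    (if l[p] = 'X' then F l (p+1) else (l[p], (p : Int)) :: F l (p+1))
  else []
termination_by l.length - p

-- structural form of the same table, index carried along
def G (l : List Char) (k : Int) : List (Char × Int) :=
  match l with
  | [] => []
  | c :: t => if c = 'X' then G t (k+1) else (c, k) :: G t (k+1)

theorem F_off_end (l : List Char) (p : Nat) (h : l.length ≤ p) : F l p = [] := by
  unfold F; simp [Nat.not_lt.mpr h]

theorem F_eq_skip (l : List Char) (p : Nat) : F l p = F l (skipX l p) := by
  unfold skipX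
  split
  · split
    · rename_i h hx
      have : F l p = F l (p+1) := by rw [F]; simp [h, hx]
      rw [this]; exact F_eq_skip l (p+1)
    · rfl
  · rfl
termination_by l.length - p

theorem skipX_stop (l : List Char) (p : Nat) (h : skipX l p < l.length) :
    l[skipX l p] ≠ 'X' := by
  by_cases hp : p < l.length
  · by_cases hx : l[p] = 'X'
    · have e : skipX l p = skipX l (p+1) := by rw [skipX]; simp [hp, hx]
      rw [e] at h
      simp only [e]
      exact skipX_stop l (p+1) h
    · have e : skipX l p = p := by rw [skipX]; simp [hp, hx]
      simp only [e]
      exact hx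
  · have e : skipX l p = p := by rw [skipX]; simp [hp]
    omega
termination_by l.length - p

theorem F_cons (l : List Char) (q : Nat) (h : q < l.length) (hx : l[q] ≠ 'X') :
    F l q = (l[q], (q : Int)) :: F l (q+1) := by
  rw [F]; simp [h, hx]

theorem F_eq_G (l : List Char) (p : Nat) : F l p = G (l.drop p) (p : Int) := by
  by_cases h : p < l.length
  · have hd : l.drop p = l[p] :: l.drop (p+1) := List.drop_eq_getElem_cons h
    rw [F, hd]
    simp only [h, dif_pos]
    by_cases hx : l[p] = 'X'
    · simp [G, hx, F_eq_G l (p+1), Int.natCast_succ]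
    · simp [G, hx, F_eq_G l (p+1), Int.natCast_succ]
  · rw [F_off_end l p (by omega), List.drop_eq_nil_of_le (by omega)]
    rfl
termination_by l.length - p

theorem map_fst_G (l : List Char) (k : Int) :
    (G l k).map Prod.fst = l.filter (fun c => c ≠ 'X') := by
  induction l generalizing k with
  | nil => rfl
  | cons c t ih =>
    by_cases hx : c = 'X' <;> simp [G, hx, ih, List.filter_cons]

theorem replace_go_X (fuel : Nat) (l acc : List Char) (h : l.length ≤ fuel) :
    PySem.Chars.replace.go ['X'] [] fuel l acc
      = acc.reverse ++ l.filter (fun c => c ≠ 'X') := by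
  induction fuel generalizing l acc with
  | zero =>
    have : l = [] := List.eq_nil_of_length_eq_zero (by omega)
    subst this; simp [PySem.Chars.replace.go]
  | succ n ih =>
    cases l with
    | nil => simp [PySem.Chars.replace.go]
    | cons c t =>
      rw [PySem.Chars.replace.go]
      by_cases hx : c = 'X'
      · subst hx
        have hp : List.isPrefixOf ['X'] ('X' :: t) = true := by
          simp [List.isPrefixOf]
        simp only [hp, if_pos, List.length_cons, List.length_nil, List.drop_succ_cons,
          List.drop_zero, List.reverse_nil, List.nil_append]
        rw [ih t acc (by simp at h; omega)]
        simp [List.filter_cons]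
      · have hp : List.isPrefixOf ['X'] (c :: t) = false := by
          simp only [List.isPrefixOf, List.isPrefixOf_nil_left, Bool.and_true, beq_eq_false_iff_ne]
          exact fun hh => hx hh.symm
        simp only [hp, Bool.false_eq_true, if_false]
        rw [ih t (c :: acc) (by simp at h ⊢; omega)]
        simp [List.filter_cons, hx]

theorem replace_X (l : List Char) :
    PySem.Chars.replace l ['X'] [] = l.filter (fun c => c ≠ 'X') := by
  rw [PySem.Chars.replace]
  simp only [List.isEmpty_cons, if_neg]
  exact replace_go_X l.length l [] (Nat.le_refl _)

-- per-pair L/R constraint of A's matched pairs, and the all-pairs form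
def pairOK (a b : Char × Int) : Bool :=
  !((a.1 == 'L' && decide (a.2 < b.2)) || (a.1 == 'R' && decide (a.2 > b.2)))

def allPairs (xs ys : List (Char × Int)) : Bool := (xs.zip ys).all (fun q => pairOK q.1 q.2)

theorem loopA_eq (s e : List Char) (p1 p2 : Nat)
    (hm : (F s p1).map Prod.fst = (F e p2).map Prod.fst) :
    loopA s e p1 p2 = allPairs (F s p1) (F e p2) := by
  rw [loopA]
  split
  · rename_i hlt
    obtain ⟨h1, h2⟩ := hlt
    set q1 := skipX s p1 with hq1
    set q2 := skipX e p2 with hq2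
    rw [F_eq_skip s p1, F_eq_skip e p2, ← hq1, ← hq2] at hm ⊢
    have hle1 : q1 ≤ s.length := skipX_le s p1 (Nat.le_of_lt h1)
    have hle2 : q2 ≤ e.length := skipX_le e p2 (Nat.le_of_lt h2)
    split
    · rename_i hend
      rcases hend with hend | hend
      · rw [F_off_end s q1 (by omega)] at hm ⊢
        have : F e q2 = [] := by
          cases hF : F e q2 with
          | nil => rfl
          | cons a t => rw [hF] at hm; simp at hm
        rw [this]; rfl
      · rw [F_off_end e q2 (by omega)] at hm ⊢
        have : F s q1 = [] := by
          cases hF : F s q1 with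
          | nil => rfl
          | cons a t => rw [hF] at hm; simp at hm
        rw [this]; rfl
    · rename_i hend
      push_neg at hend
      have hlt1 : q1 < s.length := by omega
      have hlt2 : q2 < e.length := by omega
      have hx1 : s[q1] ≠ 'X' := skipX_stop s p1 (by rwa [← hq1])
      have hx2 : e[q2] ≠ 'X' := skipX_stop e p2 (by rwa [← hq2])
      rw [F_cons s q1 hlt1 hx1, F_cons e q2 hlt2 hx2] at hm ⊢
      simp only [List.map_cons, List.cons.injEq] at hm
      obtain ⟨hceq, htail⟩ := hm
      have hg1 : s.getD q1 ' ' = s[q1] := List.getD_eq_getElem s ' ' hlt1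
      have hg2 : e.getD q2 ' ' = e[q2] := List.getD_eq_getElem e ' ' hlt2
      split
      · rename_i hviol
        rw [hg1, hg2] at hviol
        have hv : (s[q1] = 'L' ∧ q1 < q2) ∨ (s[q1] = 'R' ∧ q2 < q1) := by
          rcases hviol with h | h | h
          · exact absurd hceq h
          · exact Or.inl h
          · exact Or.inr h
        unfold allPairs
        rw [List.zip_cons_cons, List.all_cons]
        have : pairOK (s[q1], (q1 : Int)) (e[q2], (q2 : Int)) = false := by
          unfold pairOK
          rcases hv with ⟨hc, hlt⟩ | ⟨hc, hlt⟩ <;>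
            simp [hc, Int.ofNat_lt.mpr hlt]
        simp [this]
      · rename_i hviol
        rw [hg1, hg2] at hviol
        push_neg at hviol
        obtain ⟨_, hL, hR⟩ := hviol
        unfold allPairs
        rw [List.zip_cons_cons, List.all_cons]
        have hok : pairOK (s[q1], (q1 : Int)) (e[q2], (q2 : Int)) = true := by
          unfold pairOK
          by_cases hcL : s[q1] = 'L'
          · have := hL hcL
            simp [hcL, Int.ofNat_lt, this]
          · by_cases hcR : s[q1] = 'R'
            · have := hR hcR
              simp [hcR, hcL, Int.ofNat_lt, this]
            · simp [hcL, hcR]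
        rw [hok]
        simpa [allPairs] using loopA_eq s e (q1+1) (q2+1) htail
  · rename_i hlt
    rw [Decidable.not_and_iff_or_not] at hlt
    rcases hlt with h | h
    · rw [F_off_end s p1 (by omega)] at hm ⊢
      have : F e p2 = [] := by
        cases hF : F e p2 with
        | nil => rfl
        | cons a t => rw [hF] at hm; simp at hm
      rw [this]; rfl
    · rw [F_off_end e p2 (by omega)] at hm ⊢
      have : F s p1 = [] := by
        cases hF : F s p1 with
        | nil => rfl
        | cons a t => rw [hF] at hm; simp at hm
      rw [this]; rfl
termination_by s.length - p1
decreasing_by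
  have h1' := skipX_ge s p1
  omega

-- positions of the character c in a (char, index) table
def posF (c : Char) (l : List (Char × Int)) : List Int :=
  (l.filter (fun p => p.1 = c)).map Prod.snd

theorem G_snd_lb (l : List Char) (k : Int) : ∀ x ∈ G l k, k ≤ x.2 := by
  induction l generalizing k with
  | nil => simp [G]
  | cons c t ih =>
    intro x hx
    by_cases hc : c = 'X'
    · simp only [G, hc, if_pos] at hx
      have := ih (k+1) x hx; omega
    · have hG : G (c :: t) k = (c, k) :: G t (k+1) := by simp [G, hc]
      rw [hG, List.mem_cons] at hx
      rcases hx with h | h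
      · subst h; omega
      · have := ih (k+1) x h; omega

theorem G_snd_ub (l : List Char) (k : Int) : ∀ x ∈ G l k, x.2 < k + l.length := by
  induction l generalizing k with
  | nil => simp [G]
  | cons c t ih =>
    intro x hx
    by_cases hc : c = 'X'
    · simp only [G, hc, if_pos] at hx
      have := ih (k+1) x hx; simp; omega
    · have hG : G (c :: t) k = (c, k) :: G t (k+1) := by simp [G, hc]
      rw [hG, List.mem_cons] at hx
      rcases hx with h | h
      · subst h; simp
      · have := ih (k+1) x h; simp at this ⊢; omega

theorem G_snd_sorted (l : List Char) (k : Int) :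
    ((G l k).map Prod.snd).Pairwise (· < ·) := by
  induction l generalizing k with
  | nil => simp [G]
  | cons c t ih =>
    by_cases hc : c = 'X'
    · simpa [G, hc] using ih (k+1)
    · have hG : G (c :: t) k = (c, k) :: G t (k+1) := by simp [G, hc]
      rw [hG, List.map_cons]
      refine List.Pairwise.cons ?_ (ih (k+1))
      intro x hx
      simp only [List.mem_map] at hx
      obtain ⟨p, hp, rfl⟩ := hx
      have := G_snd_lb t (k+1) p hp; omega

theorem posF_sorted (c : Char) (l : List Char) (k : Int) :
    (posF c (G l k)).Pairwise (· < ·) := by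
  have hs : (posF c (G l k)).Sublist ((G l k).map Prod.snd) :=
    ((G l k).filter_sublist).map Prod.snd
  exact (G_snd_sorted l k).sublist hs

theorem posF_lb (c : Char) (l : List Char) (k : Int) :
    ∀ x ∈ posF c (G l k), k ≤ x := by
  intro x hx
  simp only [posF, List.mem_map, List.mem_filter] at hx
  obtain ⟨p, ⟨hp, _⟩, rfl⟩ := hx
  exact G_snd_lb l k p hp

theorem posF_ub (c : Char) (l : List Char) (k : Int) :
    ∀ x ∈ posF c (G l k), x < k + l.length := by
  intro x hx
  simp only [posF, List.mem_map, List.mem_filter] at hx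
  obtain ⟨p, ⟨hp, _⟩, rfl⟩ := hx
  exact G_snd_ub l k p hp

theorem posF_length (c : Char) (xs : List (Char × Int)) :
    (posF c xs).length = (xs.map Prod.fst).countP (fun a => a = c) := by
  simp only [posF, List.length_map, List.countP_map, Function.comp_def]
  exact List.countP_eq_length_filter.symm

-- prefix counts as threshold counts of position lists
theorem countPos (c : Char) (hc : c ≠ 'X') (l : List Char) (k : Int) (i : Nat) :
    (posF c (G l k)).countP (fun x => decide (x < k + (i : Int))) = (l.take i).count c := by
  induction l generalizing k i with
  | nil => simp [G, posF]
  | cons a t ih =>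
    cases i with
    | zero =>
      simp only [Nat.cast_zero, Int.add_zero, List.take_zero, List.count_nil]
      refine List.countP_eq_zero.mpr ?_
      intro x hx
      have := posF_lb c (a :: t) k x hx
      simp; omega
    | succ j =>
      have hk : k + ((j + 1 : Nat) : Int) = (k + 1) + (j : Int) := by push_cast; omega
      by_cases ha : a = 'X'
      · subst ha
        have hG : G ('X' :: t) k = G t (k+1) := by simp [G]
        have hb : ('X' == c) = false := by
          refine beq_eq_false_iff_ne.mpr ?_
          exact fun h => hc h.symm
        rw [hG, hk, ih (k+1) j, List.take_succ_cons, List.count_cons, hb]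
        simp
      · have hG : G (a :: t) k = (a, k) :: G t (k+1) := by simp [G, ha]
        rw [hG]
        by_cases hac : a = c
        · subst hac
          have hp : posF a ((a, k) :: G t (k+1)) = k :: posF a (G t (k+1)) := by
            simp [posF, List.filter_cons]
          rw [hp, List.countP_cons, hk, ih (k+1) j, List.take_succ_cons, List.count_cons]
          have h1 : (decide (k < k + 1 + (j : Int))) = true := by simp; omega
          simp [h1]
        · have hp : posF c ((a, k) :: G t (k+1)) = posF c (G t (k+1)) := by
            simp [posF, List.filter_cons, hac]
          have hb : (a == c) = false := beq_eq_false_iff_ne.mpr hac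
          rw [hp, hk, ih (k+1) j, List.take_succ_cons, List.count_cons, hb]
          simp

-- majorization: pointwise domination of sorted position lists ⟺ threshold counts
theorem major (xs ys : List Int) (hlen : xs.length = ys.length)
    (hxs : xs.Pairwise (· < ·)) (hys : ys.Pairwise (· < ·)) :
    ((xs.zip ys).all (fun q => decide (q.2 ≤ q.1)) = true) ↔
      ∀ i : Int, xs.countP (fun x => decide (x < i)) ≤ ys.countP (fun x => decide (x < i)) := by
  induction xs generalizing ys with
  | nil =>
    have : ys = [] := List.eq_nil_of_length_eq_zero (by simpa using hlen.symm)
    subst this; simp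
  | cons x xs' ih =>
    cases ys with
    | nil => simp at hlen
    | cons y ys' =>
      have hlen' : xs'.length = ys'.length := by simpa using hlen
      have hxs' := hxs.of_cons
      have hys' := hys.of_cons
      constructor
      · intro hall i
        simp only [List.zip_cons_cons, List.all_cons, Bool.and_eq_true, decide_eq_true_eq] at hall
        obtain ⟨hyx, htl⟩ := hall
        have htail := (ih ys' hlen' hxs' hys').mp htl i
        simp only [List.countP_cons]
        by_cases hx : x < i
        · have hy : y < i := by omega
          simp [hx, hy]; omega
        · simp only [decide_eq_true_eq]
          split_ifs with hy <;> omega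
      · intro hcnt
        have hyx : y ≤ x := by
          have h1 := hcnt (x + 1)
          have hx1 : (0 : Nat) < (x :: xs').countP (fun a => decide (a < x + 1)) := by
            rw [List.countP_cons]
            have hxt : (decide (x < x + 1)) = true := by simp
            rw [hxt]
            simp
          have h2 : 0 < (y :: ys').countP (fun a => decide (a < x + 1)) := by omega
          obtain ⟨a, ha, hai⟩ := List.countP_pos_iff.mp h2
          simp only [decide_eq_true_eq] at hai
          rcases List.mem_cons.mp ha with rfl | hmem
          · omega
          · have := (List.pairwise_cons.mp hys).1 a hmem
            omega
        have htail : ∀ i : Int, xs'.countP (fun a => decide (a < i)) ≤ ys'.countP (fun a => decide (a < i)) := by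
          intro i
          by_cases hx : x < i
          · have hy : y < i := by omega
            have := hcnt i
            simp only [List.countP_cons, decide_eq_true_eq] at this
            simp only [hx, hy, if_pos] at this
            omega
          · have : xs'.countP (fun a => decide (a < i)) = 0 := by
              refine List.countP_eq_zero.mpr ?_
              intro a ha
              have := (List.pairwise_cons.mp hxs).1 a ha
              simp; omega
            omega
        simp only [List.zip_cons_cons, List.all_cons, Bool.and_eq_true, decide_eq_true_eq]
        exact ⟨hyx, (ih ys' hlen' hxs' hys').mpr htail⟩

-- swap the zip order of an all-pairs test
theorem zip_all_swap (p : Int → Int → Bool) (xs ys : List Int) :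
    (xs.zip ys).all (fun q => p q.1 q.2) = (ys.zip xs).all (fun q => p q.2 q.1) := by
  induction xs generalizing ys with
  | nil => cases ys <;> rfl
  | cons x xs' ih =>
    cases ys with
    | nil => rfl
    | cons y ys' => simp [ih]

-- A's all-pairs test splits into the 'L' and 'R' pointwise-domination tests
theorem zipSplit (xs ys : List (Char × Int)) (hm : xs.map Prod.fst = ys.map Prod.fst) :
    allPairs xs ys =
      (((posF 'L' xs).zip (posF 'L' ys)).all (fun q => decide (q.2 ≤ q.1)) &&
       ((posF 'R' xs).zip (posF 'R' ys)).all (fun q => decide (q.1 ≤ q.2))) := by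
  induction xs generalizing ys with
  | nil =>
    have : ys = [] := by
      cases ys with
      | nil => rfl
      | cons b t => simp at hm
    subst this; rfl
  | cons a xs' ih =>
    cases ys with
    | nil => simp at hm
    | cons b ys' =>
      obtain ⟨c, i⟩ := a
      obtain ⟨c', j⟩ := b
      simp only [List.map_cons, List.cons.injEq] at hm
      obtain ⟨hc, htl⟩ := hm
      subst hc
      have ihr := ih ys' htl
      simp only [allPairs] at ihr ⊢
      rw [List.zip_cons_cons, List.all_cons, ihr]
      by_cases hcL : c = 'L'
      · subst hcL
        have e1 : posF 'L' (('L', i) :: xs') = i :: posF 'L' xs' := by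
          simp [posF, List.filter_cons]
        have e2 : posF 'L' (('L', j) :: ys') = j :: posF 'L' ys' := by
          simp [posF, List.filter_cons]
        have e3 : posF 'R' (('L', i) :: xs') = posF 'R' xs' := by
          simp [posF, List.filter_cons]
        have e4 : posF 'R' (('L', j) :: ys') = posF 'R' ys' := by
          simp [posF, List.filter_cons]
        rw [e1, e2, e3, e4, List.zip_cons_cons, List.all_cons]
        have hp : pairOK ('L', i) ('L', j) = decide (j ≤ i) := by
          simp only [pairOK, show ('L' == 'L') = true from rfl,
            show ('L' == 'R') = false from rfl, Bool.true_and, Bool.false_and,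
            Bool.or_false, ← decide_not, decide_eq_decide]
          omega
        rw [hp, Bool.and_assoc]
      · by_cases hcR : c = 'R'
        · subst hcR
          have e1 : posF 'L' (('R', i) :: xs') = posF 'L' xs' := by
            simp [posF, List.filter_cons]
          have e2 : posF 'L' (('R', j) :: ys') = posF 'L' ys' := by
            simp [posF, List.filter_cons]
          have e3 : posF 'R' (('R', i) :: xs') = i :: posF 'R' xs' := by
            simp [posF, List.filter_cons]
          have e4 : posF 'R' (('R', j) :: ys') = j :: posF 'R' ys' := by
            simp [posF, List.filter_cons]
          rw [e1, e2, e3, e4, List.zip_cons_cons, List.all_cons]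
          have hp : pairOK ('R', i) ('R', j) = decide (i ≤ j) := by
            simp only [pairOK, show ('R' == 'L') = false from rfl,
              show ('R' == 'R') = true from rfl, Bool.true_and, Bool.false_and,
              Bool.false_or, ← decide_not, decide_eq_decide]
            omega
          rw [hp]
          simp only [Bool.and_assoc, Bool.and_left_comm]
        · have e1 : posF 'L' ((c, i) :: xs') = posF 'L' xs' := by
            simp [posF, List.filter_cons, hcL]
          have e2 : posF 'L' ((c, j) :: ys') = posF 'L' ys' := by
            simp [posF, List.filter_cons, hcL]
          have e3 : posF 'R' ((c, i) :: xs') = posF 'R' xs' := by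
            simp [posF, List.filter_cons, hcR]
          have e4 : posF 'R' ((c, j) :: ys') = posF 'R' ys' := by
            simp [posF, List.filter_cons, hcR]
          rw [e1, e2, e3, e4]
          have hp : pairOK (c, i) (c, j) = true := by simp [pairOK, hcL, hcR]
          rw [hp, Bool.true_and]

-- characterization of B's loop as the prefix-count conditions
theorem loopB_iff (s e : List Char) (hlen : s.length = e.length) (ls rs le re : Int)
    (h0 : ls ≤ le) (h1 : re ≤ rs) :
    (loopB (s.zip e) ls rs le re = true) ↔
      ∀ i : Nat, i ≤ s.length →
        ls + ((s.take i).count 'L' : Int) ≤ le + ((e.take i).count 'L') ∧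
        re + ((e.take i).count 'R' : Int) ≤ rs + ((s.take i).count 'R') := by
  induction s generalizing e ls rs le re with
  | nil =>
    constructor
    · intro _ i hi
      have hz : i = 0 := Nat.le_zero.mp hi
      subst hz
      simpa using ⟨h0, h1⟩
    · intro _; rfl
  | cons a s' ih =>
    cases e with
    | nil => simp at hlen
    | cons b e' =>
      have hlen' : s'.length = e'.length := by simpa using hlen
      rw [List.zip_cons_cons, loopB]
      set ls' := if a = 'L' then ls + 1 else ls with hls
      set rs' := if a = 'L' then rs else if a = 'R' then rs + 1 else rs with hrs
      set le' := if b = 'L' then le + 1 else le with hle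
      set re' := if b = 'L' then re else if b = 'R' then re + 1 else re with hre
      -- counts contributed by the heads
      have hCL : ∀ (c : Char) (u : List Char) (n : Int),
          (n + (((c :: u).count 'L' : Nat) : Int) = (if c = 'L' then n + 1 else n) + ((u.count 'L' : Nat) : Int)) := by
        intro c u n
        by_cases h : c = 'L' <;> simp [List.count_cons, h] <;> push_cast <;> omega
      have hCR : ∀ (c : Char) (u : List Char) (n : Int),
          (n + (((c :: u).count 'R' : Nat) : Int) = (if c = 'L' then n else if c = 'R' then n + 1 else n) + ((u.count 'R' : Nat) : Int)) := by
        intro c u n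
        by_cases h : c = 'L'
        · have : ¬ c = 'R' := by subst h; decide
          simp [List.count_cons, h, this]
        · by_cases h2 : c = 'R' <;> simp [List.count_cons, h, h2] <;> push_cast <;> omega
      by_cases hg : le' < ls' ∨ re' > rs'
      · rw [if_pos hg]
        constructor
        · intro h; exact absurd h (by simp)
        · intro hall
          exfalso
          have := hall 1 (by simp)
          simp only [List.take_succ_cons, List.take_zero] at this
          rw [hCL a [] ls, hCL b [] le, hCR b [] re, hCR a [] rs] at this
          simp only [List.count_nil, Nat.cast_zero, Int.add_zero] at this
          rw [← hls, ← hle, ← hre, ← hrs] at this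
          omega
      · rw [if_neg hg]
        push_neg at hg
        have ihr := ih e' hlen' ls' rs' le' re' (by omega) (by omega)
        rw [ihr]
        constructor
        · intro hall i hi
          cases i with
          | zero => simpa using ⟨h0, h1⟩
          | succ j =>
            have := hall j (by simpa using hi)
            simp only [List.take_succ_cons]
            rw [hCL a _ ls, hCL b _ le, hCR b _ re, hCR a _ rs, ← hls, ← hle, ← hre, ← hrs]
            exact this
        · intro hall j hj
          have := hall (j+1) (by simpa using hj)
          simp only [List.take_succ_cons] at this
          rw [hCL a _ ls, hCL b _ le, hCR b _ re, hCR a _ rs, ← hls, ← hle, ← hre, ← hrs] at this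
          exact this

-- bridge between Int-threshold counts and Nat-prefix counts
theorem threshold_iff (c : Char) (hc : c ≠ 'X') (s e : List Char) (hlen : s.length = e.length)
    (hplen : (posF c (G s 0)).length = (posF c (G e 0)).length) :
    (∀ i : Int, (posF c (G s 0)).countP (fun x => decide (x < i)) ≤ (posF c (G e 0)).countP (fun x => decide (x < i))) ↔
      ∀ i : Nat, i ≤ s.length → ((s.take i).count c : Int) ≤ ((e.take i).count c : Int) := by
  constructor
  · intro h i hi
    have := h (i : Int)
    rw [show ((i : Nat) : Int) = 0 + (i : Int) by omega] at this
    rw [countPos c hc s 0 i, countPos c hc e 0 i] at this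
    exact_mod_cast this
  · intro h i
    by_cases hi0 : i ≤ 0
    · have : (posF c (G s 0)).countP (fun x => decide (x < i)) = 0 := by
        refine List.countP_eq_zero.mpr ?_
        intro x hx
        have := posF_lb c s 0 x hx
        simp; omega
      omega
    · push_neg at hi0
      by_cases hin : i ≤ (s.length : Int)
      · have hitn : i = ((i.toNat : Nat) : Int) := by omega
        have hle : i.toNat ≤ s.length := by omega
        have := h i.toNat hle
        rw [hitn, show ((i.toNat : Nat) : Int) = 0 + ((i.toNat : Nat) : Int) by omega,
          countPos c hc s 0 i.toNat, countPos c hc e 0 i.toNat]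
        exact_mod_cast this
      · push_neg at hin
        have hs : (posF c (G s 0)).countP (fun x => decide (x < i)) = (posF c (G s 0)).length := by
          refine List.countP_eq_length.mpr ?_
          intro x hx
          have := posF_ub c s 0 x hx
          simp; omega
        have he : (posF c (G e 0)).countP (fun x => decide (x < i)) = (posF c (G e 0)).length := by
          refine List.countP_eq_length.mpr ?_
          intro x hx
          have := posF_ub c e 0 x hx
          simp; omega
        have hcle : (posF c (G e 0)).countP (fun x => decide (x < i)) ≤ (posF c (G e 0)).length :=
          List.countP_le_length
        omega

-- the central bridge: A's matched loop equals B's prefix-count loop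
theorem loops_agree (s e : List Char) (hlen : s.length = e.length)
    (hseq : s.filter (fun c => c ≠ 'X') = e.filter (fun c => c ≠ 'X')) :
    loopA s e 0 0 = loopB (s.zip e) 0 0 0 0 := by
  have hm : (F s 0).map Prod.fst = (F e 0).map Prod.fst := by
    rw [F_eq_G, F_eq_G]
    simpa [map_fst_G] using hseq
  have hG : (G s 0).map Prod.fst = (G e 0).map Prod.fst := by
    simpa [map_fst_G] using hseq
  rw [loopA_eq s e 0 0 hm]
  have hFG : allPairs (F s 0) (F e 0) = allPairs (G s 0) (G e 0) := by
    rw [F_eq_G, F_eq_G]; norm_num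
  rw [hFG, zipSplit _ _ hG]
  have hLlen : (posF 'L' (G s 0)).length = (posF 'L' (G e 0)).length := by
    rw [posF_length, posF_length, hG]
  have hRlen : (posF 'R' (G s 0)).length = (posF 'R' (G e 0)).length := by
    rw [posF_length, posF_length, hG]
  have hLmaj := major (posF 'L' (G s 0)) (posF 'L' (G e 0)) hLlen
    (posF_sorted 'L' s 0) (posF_sorted 'L' e 0)
  have hRmaj := major (posF 'R' (G e 0)) (posF 'R' (G s 0)) hRlen.symm
    (posF_sorted 'R' e 0) (posF_sorted 'R' s 0)
  have hRswap : ((posF 'R' (G s 0)).zip (posF 'R' (G e 0))).all (fun q => decide (q.1 ≤ q.2)) =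
      ((posF 'R' (G e 0)).zip (posF 'R' (G s 0))).all (fun q => decide (q.2 ≤ q.1)) := by
    rw [zip_all_swap (fun x y => decide (x ≤ y))]
  have hLth := threshold_iff 'L' (by decide) s e hlen hLlen
  have hRth := threshold_iff 'R' (by decide) e s hlen.symm hRlen.symm
  have hB := loopB_iff s e hlen 0 0 0 0 (le_refl 0) (le_refl 0)
  rw [hRswap]
  rcases hb : loopB (s.zip e) 0 0 0 0 with _ | _
  · -- loopB false: some prefix condition fails; show the split test is false
    rw [Bool.eq_false_iff]
    intro hcon
    rw [Bool.and_eq_true] at hcon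
    have hLall := hLmaj.mp hcon.1
    have hRall := hRmaj.mp hcon.2
    have hLc := hLth.mp hLall
    have hRc := fun i hi => hRth.mp hRall i (by omega)
    have : loopB (s.zip e) 0 0 0 0 = true := by
      rw [hB]
      intro i hi
      constructor
      · have := hLc i hi; omega
      · have := hRc i (by omega); omega
    rw [hb] at this; exact Bool.false_ne_true this
  · -- loopB true: all prefix conditions hold; the split test is true
    have hall := hB.mp hb
    rw [Bool.and_eq_true]
    constructor
    · rw [hLmaj]
      rw [hLth]
      intro i hi
      have := (hall i hi).1; omega
    · rw [hRmaj]
      rw [hRth]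
      intro i hi
      have := (hall i (by omega)).2; omega

-- ===== VERDICT (by name: the statement is the Claim_ definition above) =====
theorem canTransform_spec : Claim_equal_canTransform := by
  intro start end_ _
  unfold Spec_canTransform canTransform canTransform_alt
  by_cases hlen : PySem.Str.len start ≠ PySem.Str.len end_
  · rw [if_pos hlen, if_pos hlen]
  · rw [if_neg hlen, if_neg hlen]
    push_neg at hlen
    have hlen' : start.toList.length = end_.toList.length := by
      have := congrArg Int.toNat hlen
      simpa [PySem.Str.len] using this
    have hrepl : (PySem.Str.replace start "X" "" = PySem.Str.replace end_ "X" "") ↔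
        (start.toList.filter (fun c => c ≠ 'X') = end_.toList.filter (fun c => c ≠ 'X')) := by
      constructor
      · intro h
        have := congrArg String.toList h
        simpa [PySem.Str.toList_replace, replace_X] using this
      · intro h
        have hl : (PySem.Str.replace start "X" "").toList
            = (PySem.Str.replace end_ "X" "").toList := by
          rw [PySem.Str.toList_replace, PySem.Str.toList_replace]
          simpa [replace_X] using h
        exact String.toList_inj.mp hl
    by_cases hr : PySem.Str.replace start "X" "" = PySem.Str.replace end_ "X" ""
    · have hf := hrepl.mp hr
      rw [if_neg (by simpa using hr), if_neg (by simpa using hf)]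
      exact loops_agree start.toList end_.toList hlen' hf
    · rw [if_pos (by simpa using hr), if_pos (by simpa using fun hc => hr (hrepl.mpr hc))]
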